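-- pv_equiv track=rewrite | github.com/YUKEXC/KMLSD | lora_plm/utils.py | apply_combo_to_wt
-- ===== SOURCE A (Python) =====
-- from typing import Dict, List, Tuple
--
-- def apply_combo_to_wt(wt_seq: str, ref_positions: List[int], r2s: Dict[int, int], combo: str) -> str:
--     if len(combo) != len(ref_positions):
--         raise ValueError(f"Combo length {len(combo)} != num positions {len(ref_positions)}")
--     s_list = list(wt_seq)
--     for i, rp in enumerate(ref_positions):
--         si = r2s[rp]
--         s_list[si] = combo[i]
--     return ''.join(s_list)
-- ===== SOURCE B (Python) =====
-- from typing import Dict, List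
--
--
-- def apply_combo_to_wt(wt_seq: str, ref_positions: List[int], r2s: Dict[int, int], combo: str) -> str:
--     if len(combo) != len(ref_positions):
--         raise ValueError(f"Combo length {len(combo)} != num positions {len(ref_positions)}")
--     repl = {}
--     for i, rp in enumerate(ref_positions):
--         repl[r2s[rp]] = combo[i]
--     parts = []
--     prev = 0
--     for si in sorted(repl):
--         parts.append(wt_seq[prev:si])
--         parts.append(repl[si])
--         prev = si + 1
--     parts.append(wt_seq[prev:])
--     return ''.join(parts)
-- ===== Notes on version B (the rewrite author's own statement) =====
-- stated objective: alternative
-- what changed: B collects the replacements into a table, sorts the target indices, and assembles the result by splicing the untouched slices of wt_seq between consecutive sorted targets, instead of mutating a char list at the k target positions.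
-- outside the precondition, e.g. on apply_combo_to_wt('AB', [0], {0: -1}, 'C'): A returns 'AC', B returns 'ACAB'
import Mathlib
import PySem

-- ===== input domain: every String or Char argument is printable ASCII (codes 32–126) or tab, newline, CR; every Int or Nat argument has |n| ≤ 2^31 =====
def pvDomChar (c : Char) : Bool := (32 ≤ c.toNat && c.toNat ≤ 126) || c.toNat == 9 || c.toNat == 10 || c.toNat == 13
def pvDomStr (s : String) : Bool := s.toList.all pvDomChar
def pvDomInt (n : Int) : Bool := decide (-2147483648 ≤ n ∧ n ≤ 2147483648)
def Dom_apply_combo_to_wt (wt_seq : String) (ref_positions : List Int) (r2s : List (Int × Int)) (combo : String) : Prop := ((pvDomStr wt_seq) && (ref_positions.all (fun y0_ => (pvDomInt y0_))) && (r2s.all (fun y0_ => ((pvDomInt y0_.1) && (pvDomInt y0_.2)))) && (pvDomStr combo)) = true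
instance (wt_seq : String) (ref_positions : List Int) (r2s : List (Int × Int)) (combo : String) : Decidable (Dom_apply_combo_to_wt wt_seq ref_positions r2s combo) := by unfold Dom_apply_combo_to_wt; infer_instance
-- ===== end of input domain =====

-- B replaces A's in-place mutation of a char list at the k mapped positions by a sort-then-splice
-- assembly: it sorts the mapped target indices and concatenates the untouched slices of wt_seq
-- between them with the replacement characters (return-value equivalence; A's raising paths and
-- the negative-mapped-index corner are excluded by Pre_).

-- ===== PORT A =====
def apply_combo_to_wt (wt_seq : String) (ref_positions : List Int) (r2s : List (Int × Int)) (combo : String) : String :=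
  -- length-mismatch / missing key / out-of-range index raise in Python: excluded by Pre_
  let d := PySem.Dict.ofList r2s
  let cs := combo.toList
  let s_list := (PySem.List.enumerate ref_positions).foldl
    (fun s p =>
      match d.get? p.2 with
      | some si => PySem.List.pySetD s si (PySem.List.pyGetD cs p.1 ' ')
      | none => s) wt_seq.toList
  String.ofList s_list

-- ===== PORT B =====
def apply_combo_to_wt_alt (wt_seq : String) (ref_positions : List Int) (r2s : List (Int × Int)) (combo : String) : String :=
  let d := PySem.Dict.ofList r2s
  let cs := combo.toList
  let repl := (PySem.List.enumerate ref_positions).foldl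
    (fun (acc : PySem.Dict Int Char) p =>
      match d.get? p.2 with
      | some si => acc.insert si (PySem.List.pyGetD cs p.1 ' ')
      | none => acc) PySem.Dict.empty
  let st := (PySem.List.sorted repl.keys (fun x => x) false).foldl
    (fun (st : List Char × Int) si =>
      (st.1 ++ PySem.List.slice wt_seq.toList (some st.2) (some si) ++ [repl.getD si ' '], si + 1))
    ([], 0)
  String.ofList (st.1 ++ PySem.List.slice wt_seq.toList (some st.2) none)

-- ===== PRECONDITION & SPEC =====
-- Pre_ excludes A's raising inputs — length mismatch (ValueError), a ref position missing from
-- r2s (KeyError), a mapped index outside [-len, len) (IndexError) — and additionally mappings with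
-- a negative in-range mapped index: a corner no caller of a position→index map would specify, on
-- which A's value (write via Python's negative-index wraparound) and B's value (a negative-index
-- slice boundary) are both accidental.
def Pre_apply_combo_to_wt (wt_seq : String) (ref_positions : List Int) (r2s : List (Int × Int)) (combo : String) : Prop :=
  combo.toList.length = ref_positions.length ∧
  ∀ rp ∈ ref_positions, ∃ si, (PySem.Dict.ofList r2s).get? rp = some si ∧
    0 ≤ si ∧ si < (wt_seq.toList.length : Int)
instance (wt_seq : String) (ref_positions : List Int) (r2s : List (Int × Int)) (combo : String) : Decidable (Pre_apply_combo_to_wt wt_seq ref_positions r2s combo) := by unfold Pre_apply_combo_to_wt; infer_instance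
def pvWitness_apply_combo_to_wt : String × List Int × (List (Int × Int)) × String := ("AB", [0], [(0, 1)], "X")

def Spec_apply_combo_to_wt (wt_seq : String) (ref_positions : List Int) (r2s : List (Int × Int)) (combo : String) (out : String) : Prop := out = apply_combo_to_wt_alt wt_seq ref_positions r2s combo
instance (wt_seq : String) (ref_positions : List Int) (r2s : List (Int × Int)) (combo : String) (out : String) : Decidable (Spec_apply_combo_to_wt wt_seq ref_positions r2s combo out) := by unfold Spec_apply_combo_to_wt; infer_instance

-- ===== CLAIM (what is proved, stated in full; the proofs are below) =====
def Claim_equal_apply_combo_to_wt : Prop := ∀ (wt_seq : String) (ref_positions : List Int) (r2s : List (Int × Int)) (combo : String), Dom_apply_combo_to_wt wt_seq ref_positions r2s combo → Pre_apply_combo_to_wt wt_seq ref_positions r2s combo → Spec_apply_combo_to_wt wt_seq ref_positions r2s combo (apply_combo_to_wt wt_seq ref_positions r2s combo)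

-- ===== LEMMAS AND PROOFS =====

-- the result of applying a replacement table acc pointwise to s
def applyRepl (acc : PySem.Dict Int Char) (s : List Char) : List Char :=
  (PySem.List.enumerate s).map (fun p => acc.getD p.1 p.2)

theorem length_applyRepl (acc : PySem.Dict Int Char) (s : List Char) :
    (applyRepl acc s).length = s.length := by
  simp [applyRepl, PySem.List.length_enumerate]

theorem applyRepl_empty (s : List Char) : applyRepl PySem.Dict.empty s = s := by
  simp [applyRepl, PySem.Dict.getD_empty]

theorem getElem_applyRepl (acc : PySem.Dict Int Char) (s : List Char) (j : Nat)
    (h : j < (applyRepl acc s).length) :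
    (applyRepl acc s)[j] = acc.getD (j : Int) (s[j]'(by rwa [length_applyRepl] at h)) := by
  simp [applyRepl, PySem.List.getElem_enumerate]

theorem applyRepl_insert (acc : PySem.Dict Int Char) (s : List Char) (si : Int) (c : Char)
    (h0 : 0 ≤ si) :
    PySem.List.pySetD (applyRepl acc s) si c = applyRepl (acc.insert si c) s := by
  rw [PySem.List.pySetD_of_nonneg _ c h0]
  apply List.ext_getElem
  · simp [length_applyRepl]
  · intro j h1 h2
    simp only [applyRepl, List.getElem_set, List.getElem_map, PySem.List.getElem_enumerate,
      PySem.Dict.getD_insert]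
    have hlen : j < s.length := by
      have := length_applyRepl acc s; simp [List.length_set, this] at h1; omega
    by_cases hj : (j : Int) = si
    · rw [if_pos (by omega), if_pos (by omega)]
    · rw [if_neg (by omega), if_neg (by simpa using hj)]

-- A's write loop and B's table-building loop produce the same pointwise result
theorem main_lemma (d : PySem.Dict Int Int) (cs : List Char) :
    ∀ (ref : List Int) (k : Int) (acc : PySem.Dict Int Char) (s : List Char),
    (∀ rp ∈ ref, ∃ si, d.get? rp = some si ∧ 0 ≤ si ∧ si < (s.length : Int)) →
    (PySem.List.enumerate ref k).foldl
      (fun t p =>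
        match d.get? p.2 with
        | some si => PySem.List.pySetD t si (PySem.List.pyGetD cs p.1 ' ')
        | none => t) (applyRepl acc s)
    = applyRepl ((PySem.List.enumerate ref k).foldl
        (fun (a : PySem.Dict Int Char) p =>
          match d.get? p.2 with
          | some si => a.insert si (PySem.List.pyGetD cs p.1 ' ')
          | none => a) acc) s := by
  intro ref
  induction ref with
  | nil => intro k acc s _; simp [PySem.List.enumerate_nil]
  | cons rp ref' ih =>
    intro k acc s hlook
    obtain ⟨si, hsi, h0, hn⟩ := hlook rp (List.mem_cons_self ..)
    rw [PySem.List.enumerate_cons]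
    simp only [List.foldl_cons, hsi]
    rw [applyRepl_insert acc s si _ h0]
    exact ih (k + 1) _ s (fun rp hrp => hlook rp (List.mem_cons_of_mem _ hrp))

-- every key of the table built by B lies in [0, |s|)
theorem keys_bounded (d : PySem.Dict Int Int) (cs : List Char) (n : Int) :
    ∀ (ref : List Int) (k : Int) (acc : PySem.Dict Int Char),
    (∀ rp ∈ ref, ∃ si, d.get? rp = some si ∧ 0 ≤ si ∧ si < n) →
    (∀ x ∈ acc.keys, 0 ≤ x ∧ x < n) →
    ∀ x ∈ ((PySem.List.enumerate ref k).foldl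
        (fun (a : PySem.Dict Int Char) p =>
          match d.get? p.2 with
          | some si => a.insert si (PySem.List.pyGetD cs p.1 ' ')
          | none => a) acc).keys, 0 ≤ x ∧ x < n := by
  intro ref
  induction ref with
  | nil => intro k acc _ hacc; simpa [PySem.List.enumerate_nil] using hacc
  | cons rp ref' ih =>
    intro k acc hlook hacc
    obtain ⟨si, hsi, h0, hn⟩ := hlook rp (List.mem_cons_self ..)
    rw [PySem.List.enumerate_cons]
    simp only [List.foldl_cons, hsi]
    apply ih (k + 1) _ (fun rp hrp => hlook rp (List.mem_cons_of_mem _ hrp))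
    intro x hx
    rcases (PySem.Dict.mem_keys_insert ..).1 hx with h | h
    · exact h ▸ ⟨h0, hn⟩
    · exact hacc x h

-- the keys of the table are nodup
theorem keys_nodup (d : PySem.Dict Int Int) (cs : List Char) :
    ∀ (ref : List Int) (k : Int) (acc : PySem.Dict Int Char),
    acc.keys.Nodup →
    ((PySem.List.enumerate ref k).foldl
        (fun (a : PySem.Dict Int Char) p =>
          match d.get? p.2 with
          | some si => a.insert si (PySem.List.pyGetD cs p.1 ' ')
          | none => a) acc).keys.Nodup := by
  intro ref
  induction ref with
  | nil => intro k acc h; simpa [PySem.List.enumerate_nil] using h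
  | cons rp ref' ih =>
    intro k acc h
    rw [PySem.List.enumerate_cons]
    simp only [List.foldl_cons]
    cases hget : d.get? rp with
    | none => exact ih (k + 1) acc h
    | some si => exact ih (k + 1) _ (PySem.Dict.nodup_keys_insert _ _ _ h)

-- positions of s that are not keys of repl are unchanged by applyRepl (segment form)
theorem seg_eq (repl : PySem.Dict Int Char) (s : List Char) (a m : Nat)
    (h : ∀ j : Nat, a ≤ j → j < a + m → (j : Int) ∉ repl.keys) :
    ((applyRepl repl s).drop a).take m = (s.drop a).take m := by
  apply List.ext_getElem
  · simp [length_applyRepl]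
  · intro j h1 h2
    have hj : a + j < s.length := by
      simp [length_applyRepl] at h1; omega
    have hjm : j < m := by
      simp [length_applyRepl] at h1; omega
    simp only [List.getElem_take, List.getElem_drop]
    rw [getElem_applyRepl]
    have hk := h (a + j) (by omega) (by omega)
    rw [← PySem.Dict.get?_eq_none_iff_not_mem_keys] at hk
    simp only [PySem.Dict.getD, hk, Option.getD_none]

-- a present key is looked up regardless of the default
theorem getD_of_isSome (repl : PySem.Dict Int Char) (k : Int) (d1 d2 : Char)
    (h : (repl.get? k).isSome) : repl.getD k d1 = repl.getD k d2 := by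
  simp only [PySem.Dict.getD]
  cases hg : repl.get? k with
  | none => rw [hg] at h; simp at h
  | some v => rfl

-- the splice loop of B, run on the strictly increasing key list, reconstructs applyRepl
theorem splice_loop (repl : PySem.Dict Int Char) (s : List Char) :
    ∀ (ks : List Int) (prev : Nat),
    ks.Pairwise (· < ·) →
    (∀ k ∈ ks, (prev : Int) ≤ k ∧ k < (s.length : Int)) →
    (∀ k ∈ ks, (repl.get? k).isSome) →
    (∀ x ∈ repl.keys, x < (prev : Int) ∨ x ∈ ks) →
    ∃ P : Nat,
      ks.foldl
        (fun (st : List Char × Int) si =>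
          (st.1 ++ PySem.List.slice s (some st.2) (some si) ++ [repl.getD si ' '], si + 1))
        ((applyRepl repl s).take prev, (prev : Int))
      = ((applyRepl repl s).take P, (P : Int)) ∧
      (∀ x ∈ repl.keys, x < (P : Int)) := by
  intro ks
  induction ks with
  | nil =>
    intro prev _ _ _ hkeys
    exact ⟨prev, rfl, fun x hx => (hkeys x hx).resolve_right (by simp)⟩
  | cons k ks' ih =>
    intro prev hpw hbd hsome hkeys
    obtain ⟨hpk, hkn⟩ := hbd k (List.mem_cons_self ..)
    have h0k : 0 ≤ k := le_trans (by exact_mod_cast Nat.zero_le prev) hpk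
    have hkeq : k = (k.toNat : Int) := (Int.toNat_of_nonneg h0k).symm
    have hprevk : prev ≤ k.toNat := by omega
    have hkltn : k.toNat < s.length := by exact_mod_cast (by omega : (k.toNat : Int) < (s.length : Int))
    have hpwk : ∀ x ∈ ks', k < x := (List.pairwise_cons.1 hpw).1
    have hpw' : ks'.Pairwise (· < ·) := (List.pairwise_cons.1 hpw).2
    -- the new first component is the prefix of applyRepl up to k.toNat + 1
    have hARk : k.toNat < (applyRepl repl s).length := by rw [length_applyRepl]; exact hkltn
    have hfirst : (applyRepl repl s).take prev ++ PySem.List.slice s (some (prev : Int)) (some k)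
        ++ [repl.getD k ' '] = (applyRepl repl s).take (k.toNat + 1) := by
      have hmid : ((applyRepl repl s).drop prev).take (k.toNat - prev)
          = (s.drop prev).take (k.toNat - prev) := by
        apply seg_eq
        intro j haj hjm hmem
        rcases hkeys (j : Int) hmem with hlt | hin
        · omega
        · rcases List.mem_cons.1 hin with rfl | hin'
          · omega
          · have := hpwk _ hin'; omega
      have hslice : PySem.List.slice s (some (prev : Int)) (some k)
          = ((applyRepl repl s).drop prev).take (k.toNat - prev) := by
        rw [hkeq, PySem.List.slice_natCast, Int.toNat_natCast, ← hmid]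
      have hlast : repl.getD k ' ' = (applyRepl repl s)[k.toNat] := by
        rw [getElem_applyRepl, ← hkeq]
        exact getD_of_isSome repl k ' ' _ (hsome k (List.mem_cons_self ..))
      rw [hslice, hlast]
      rw [List.take_add_one]
      have htk : (applyRepl repl s).take k.toNat
          = (applyRepl repl s).take prev ++ ((applyRepl repl s).drop prev).take (k.toNat - prev) := by
        rw [← List.take_add]
        congr 1
        omega
      rw [htk, List.getElem?_eq_getElem hARk]
      simp
    have hsnd : k + 1 = ((k.toNat + 1 : Nat) : Int) := by omega
    rw [List.foldl_cons, hfirst, hsnd]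
    apply ih (k.toNat + 1)
    · exact hpw'
    · intro x hx
      have := hpwk x hx
      exact ⟨by omega, (hbd x (List.mem_cons_of_mem _ hx)).2⟩
    · intro x hx; exact hsome x (List.mem_cons_of_mem _ hx)
    · intro x hx
      rcases hkeys x hx with hlt | hin
      · left; omega
      · rcases List.mem_cons.1 hin with rfl | hin'
        · left; omega
        · right; exact hin'

-- ===== VERDICT (by name: the statement is the Claim_ definition above) =====
theorem apply_combo_to_wt_spec : Claim_equal_apply_combo_to_wt := by
  intro wt_seq ref_positions r2s combo _ hpre
  obtain ⟨hlen, hlook⟩ := hpre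
  unfold Spec_apply_combo_to_wt apply_combo_to_wt apply_combo_to_wt_alt
  simp only []
  set d := PySem.Dict.ofList r2s with hd
  set s := wt_seq.toList with hs
  set cs := combo.toList with hcs
  set repl := (PySem.List.enumerate ref_positions).foldl
    (fun (acc : PySem.Dict Int Char) p =>
      match d.get? p.2 with
      | some si => acc.insert si (PySem.List.pyGetD cs p.1 ' ')
      | none => acc) PySem.Dict.empty with hrepl
  -- A's loop result is applyRepl repl s
  have hA : (PySem.List.enumerate ref_positions).foldl
      (fun t p =>
        match d.get? p.2 with
        | some si => PySem.List.pySetD t si (PySem.List.pyGetD cs p.1 ' ')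
        | none => t) s = applyRepl repl s := by
    have := main_lemma d cs ref_positions 0 PySem.Dict.empty s hlook
    rwa [applyRepl_empty] at this
  -- facts about the key list
  have hknodup : repl.keys.Nodup := by
    rw [hrepl]
    exact keys_nodup d cs ref_positions 0 PySem.Dict.empty (by simp [PySem.Dict.keys_empty])
  have hkbd : ∀ x ∈ repl.keys, 0 ≤ x ∧ x < (s.length : Int) := by
    rw [hrepl]
    exact keys_bounded d cs (s.length : Int) ref_positions 0 PySem.Dict.empty hlook
      (by simp [PySem.Dict.keys_empty])
  set ks := PySem.List.sorted repl.keys (fun x => x) false with hks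
  have hmem : ∀ x, x ∈ ks ↔ x ∈ repl.keys := fun x => PySem.List.mem_sorted _ _ _ _
  have hkspw : ks.Pairwise (· < ·) := by
    have h1 : ks.Pairwise (fun a b => a ≤ b) := by
      simpa using PySem.List.sorted_pairwise (xs := repl.keys) (key := fun x => x)
    have h2 : ks.Nodup := (PySem.List.sorted_perm repl.keys (fun x => x) false).symm.nodup hknodup
    exact (h1.and h2).imp (fun h => lt_of_le_of_ne h.1 h.2)
  have harg1 : ∀ k ∈ ks, ((0 : Nat) : Int) ≤ k ∧ k < (s.length : Int) := by
    intro k hk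
    exact ⟨by exact_mod_cast (hkbd k ((hmem k).1 hk)).1, (hkbd k ((hmem k).1 hk)).2⟩
  have harg2 : ∀ k ∈ ks, (repl.get? k).isSome := by
    intro k hk
    rw [← PySem.Dict.contains_eq_isSome_get?]
    exact (PySem.Dict.contains_iff_mem_keys repl k).2 ((hmem k).1 hk)
  have harg3 : ∀ x ∈ repl.keys, x < ((0 : Nat) : Int) ∨ x ∈ ks := fun x hx => Or.inr ((hmem x).2 hx)
  obtain ⟨P, heq, hPbd⟩ := splice_loop repl s ks 0 hkspw harg1 harg2 harg3
  simp only [List.take_zero, Nat.cast_zero] at heq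
  rw [hA, heq]
  congr 1
  have hdropeq : (applyRepl repl s).drop P = s.drop P := by
    have := seg_eq repl s P s.length (by
      intro j hPj _ hmem'
      have := hPbd (j : Int) hmem'
      omega)
    rwa [List.take_of_length_le (by simp [length_applyRepl]),
         List.take_of_length_le (by simp)] at this
  rw [PySem.List.slice_from_natCast, ← hdropeq, List.take_append_drop]
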